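-- pv_equiv track=rewrite | github.com/silverdavi/djerba | src/utils/text_processing.py | split_text_by_paragraphs
-- ===== SOURCE A (Python) =====
-- from typing import List, Dict, Optional, Union
--
-- def split_text_by_paragraphs(text: str, max_paragraphs: int = 10) -> List[str]:
--     """Split text by paragraphs"""
--     paragraphs = text.split('\n\n')
--     chunks = []
--     current_chunk = []
--
--     for paragraph in paragraphs:
--         current_chunk.append(paragraph)
--         if len(current_chunk) >= max_paragraphs:
--             chunks.append('\n\n'.join(current_chunk))
--             current_chunk = []
--
--     if current_chunk:
--         chunks.append('\n\n'.join(current_chunk))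
--
--     return chunks
-- ===== SOURCE B (Python) =====
-- from typing import List
--
-- def split_text_by_paragraphs(text: str, max_paragraphs: int = 10) -> List[str]:
--     """Split text by paragraphs"""
--     paragraphs = text.split('\n\n')
--     k = max_paragraphs if max_paragraphs > 0 else 1
--     return ['\n\n'.join(paragraphs[i:i + k]) for i in range(0, len(paragraphs), k)]
-- ===== Notes on version B (the rewrite author's own statement) =====
-- stated objective: simpler
-- what changed: Replaced the stateful current_chunk accumulator loop with trailing flush by a single list comprehension that joins stride-k slices of the paragraph list (k clamped to 1 for non-positive max_paragraphs, which matches A's flush-every-paragraph behaviour there).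
import Mathlib
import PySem

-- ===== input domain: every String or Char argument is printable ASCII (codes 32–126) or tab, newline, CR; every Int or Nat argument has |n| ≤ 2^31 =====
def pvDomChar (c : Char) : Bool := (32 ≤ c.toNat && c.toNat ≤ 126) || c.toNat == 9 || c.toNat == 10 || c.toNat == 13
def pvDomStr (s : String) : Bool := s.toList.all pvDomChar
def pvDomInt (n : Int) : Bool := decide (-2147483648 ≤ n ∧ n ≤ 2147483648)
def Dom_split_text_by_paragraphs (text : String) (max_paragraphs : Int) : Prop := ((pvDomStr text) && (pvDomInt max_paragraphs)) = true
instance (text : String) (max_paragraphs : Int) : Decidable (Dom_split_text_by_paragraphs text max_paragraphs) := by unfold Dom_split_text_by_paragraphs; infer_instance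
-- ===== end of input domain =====

-- B replaces A's stateful current_chunk accumulator with trailing flush by joining
-- stride-k slices of the paragraph list (objective: simpler; same return value).

-- ===== PORT A =====
-- paragraphs = text.split('\n\n'); loop appending to current_chunk, flushing when its length reaches max_paragraphs; final flush.
def split_text_by_paragraphs (text : String) (max_paragraphs : Int) : List String :=
  let paragraphs := (PySem.Str.split? text "\n\n").getD []
  let st := paragraphs.foldl
    (fun (st : List String × List String) p =>
      let cur := st.2 ++ [p]
      if ((cur.length : Int)) ≥ max_paragraphs then
        (st.1 ++ [PySem.Str.join "\n\n" cur], [])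
      else
        (st.1, cur)) ([], [])
  if st.2 ≠ [] then st.1 ++ [PySem.Str.join "\n\n" st.2] else st.1

-- ===== PORT B =====
-- paragraphs = text.split('\n\n'); k = max_paragraphs if positive else 1; join each slice [i:i+k] for i in range(0, len, k).
def split_text_by_paragraphs_alt (text : String) (max_paragraphs : Int) : List String :=
  let paragraphs := (PySem.Str.split? text "\n\n").getD []
  let k := if max_paragraphs > 0 then max_paragraphs else 1
  (PySem.List.pyRange 0 (paragraphs.length : Int) k).map
    (fun i => PySem.Str.join "\n\n" (PySem.List.slice paragraphs (some i) (some (i + k))))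

-- ===== PRECONDITION & SPEC =====
def Spec_split_text_by_paragraphs (text : String) (max_paragraphs : Int) (out : List String) : Prop := out = split_text_by_paragraphs_alt text max_paragraphs
instance (text : String) (max_paragraphs : Int) (out : List String) : Decidable (Spec_split_text_by_paragraphs text max_paragraphs out) := by unfold Spec_split_text_by_paragraphs; infer_instance

-- ===== CLAIM (what is proved, stated in full; the proofs are below) =====
def Claim_equal_split_text_by_paragraphs : Prop := ∀ (text : String) (max_paragraphs : Int), Dom_split_text_by_paragraphs text max_paragraphs → Spec_split_text_by_paragraphs text max_paragraphs (split_text_by_paragraphs text max_paragraphs)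

-- ===== LEMMAS AND PROOFS =====

-- Both programs compute this grouping: the paragraph list cut into blocks of k (k ≥ 1 in use), each joined with '\n\n'.
def pvChunks (k : Nat) : List String → List String
  | [] => []
  | p :: tl => PySem.Str.join "\n\n" (p :: tl.take (k - 1)) :: pvChunks k (tl.drop (k - 1))
  termination_by ps => ps.length
  decreasing_by simp

theorem pvChunks_cons (k : Nat) (p : String) (tl : List String) :
    pvChunks k (p :: tl) =
      PySem.Str.join "\n\n" (p :: tl.take (k - 1)) :: pvChunks k (tl.drop (k - 1)) := by
  rw [pvChunks.eq_def]

theorem pyRange_pos_nil (a b s : Int) (hs : 0 < s) (hab : b ≤ a) :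
    PySem.List.pyRange a b s = [] := by
  rw [PySem.List.pyRange_of_pos a b hs, if_neg (by omega)]
  simp

theorem pyRange_pos_shift (a b s : Int) (hs : 0 < s) :
    PySem.List.pyRange (a + s) b s = (PySem.List.pyRange a (b - s) s).map (· + s) := by
  rw [PySem.List.pyRange_of_pos _ _ hs, PySem.List.pyRange_of_pos _ _ hs, List.map_map]
  have : b - (a + s) + s - 1 = b - s - a + s - 1 := by ring
  rw [this]
  have hiff : a + s < b ↔ a < b - s := by omega
  simp only [hiff]
  apply List.map_congr_left
  intro k _
  simp; ring

theorem pyRange_pos_cons (a b s : Int) (hs : 0 < s) (hab : a < b) :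
    PySem.List.pyRange a b s = a :: PySem.List.pyRange (a + s) b s := by
  rw [pyRange_pos_shift a b s hs, PySem.List.pyRange_of_pos _ _ hs, PySem.List.pyRange_of_pos _ _ hs]
  rw [if_pos hab]
  by_cases h : a < b - s
  · rw [if_pos h]
    have h1 : (b - a + s - 1) / s = (b - s - a + s - 1) / s + 1 := by
      have e : b - a + s - 1 = (b - s - a + s - 1) + 1 * s := by ring
      rw [e, Int.add_mul_ediv_right _ _ (by omega : s ≠ 0)]
    have h2 : 0 ≤ (b - s - a + s - 1) / s := Int.ediv_nonneg (by omega) (by omega)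
    rw [h1]
    have : ((b - s - a + s - 1) / s + 1).toNat = ((b - s - a + s - 1) / s).toNat + 1 := by omega
    rw [this, List.range_succ_eq_map]
    simp [List.map_map]
    intro k _
    ring
  · rw [if_neg h]
    have h1 : (b - a + s - 1) / s = 1 := by
      rw [← PySem.Int.floordiv_eq_ediv_of_pos hs]
      rw [PySem.Int.floordiv_eq_iff_of_pos]
      · omega
      · exact hs
    rw [h1]
    simp [List.range_succ]

theorem pyRange_pos_shift0 (b s : Int) (hs : 0 < s) :
    PySem.List.pyRange s b s = (PySem.List.pyRange 0 (b - s) s).map (· + s) := by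
  have := pyRange_pos_shift 0 b s hs
  simpa using this

theorem slice_shift {α : Type} (xs : List α) (K : Nat) (i k : Int) (hi : 0 ≤ i) (hk : k = (K : Int)) :
    PySem.List.slice xs (some (i + k)) (some (i + k + k)) =
    PySem.List.slice (xs.drop K) (some i) (some (i + k)) := by
  obtain ⟨I, rfl⟩ : ∃ I : Nat, i = (I : Int) := ⟨i.toNat, by omega⟩
  subst hk
  rw [PySem.List.slice_toNat, PySem.List.slice_toNat, List.drop_drop]
  · congr 1
    · omega
    · congr 1; omega
  all_goals positivity

-- B's comprehension computes pvChunks.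
theorem b_eq_chunks (k : Int) (hk : 1 ≤ k) (ps : List String) :
    (PySem.List.pyRange 0 (ps.length : Int) k).map
      (fun i => PySem.Str.join "\n\n" (PySem.List.slice ps (some i) (some (i + k)))) =
    pvChunks k.toNat ps := by
  induction ps using pvChunks.induct k.toNat with
  | case1 => rw [pyRange_pos_nil _ _ _ (by omega) (by simp)]; simp [pvChunks]
  | case2 p tl ih =>
    have hk0 : (0:Int) < k := by omega
    rw [pyRange_pos_cons _ _ _ hk0 (by simp), List.map_cons]
    rw [pvChunks]
    congr 1
    · -- head
      rw [zero_add, PySem.List.slice_zero_start, PySem.List.slice_to]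
      · congr 1
        obtain ⟨K, hK⟩ : ∃ K : Nat, k.toNat = K + 1 := ⟨k.toNat - 1, by omega⟩
        rw [hK, List.take_succ_cons]
        simp
      · omega
    · -- tail
      rw [zero_add, pyRange_pos_shift0 _ _ hk0, List.map_map]
      by_cases hlen : k ≤ (tl.length : Int) + 1
      · have hblen : ((p :: tl).length : Int) - k = ((tl.drop (k.toNat - 1)).length : Int) := by
          simp; omega
        rw [hblen, ← ih]
        apply List.map_congr_left
        intro i hi
        have h0i : 0 ≤ i := ((PySem.List.mem_pyRange_iff_of_pos hk0 i).mp hi).1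
        simp only [Function.comp_apply]
        have hdrop : tl.drop (k.toNat - 1) = (p :: tl).drop k.toNat := by
          obtain ⟨K, hK⟩ : ∃ K : Nat, k.toNat = K + 1 := ⟨k.toNat - 1, by omega⟩
          simp [hK]
        rw [hdrop, ← slice_shift (p :: tl) k.toNat i k h0i (by omega)]
      · have h1 : ((p :: tl).length : Int) - k ≤ 0 := by simp; omega
        rw [pyRange_pos_nil _ _ _ hk0 (by omega)]
        have h2 : tl.drop (k.toNat - 1) = [] := by
          apply List.drop_eq_nil_of_le; omega
        rw [h2]
        simp [pvChunks]

-- Closing a full chunk: when cur is one short of K, appending p starts a fresh group.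
theorem pvChunks_full (K : Nat) (cur : List String) (p : String) (ps' : List String)
    (h : cur.length + 1 = K) :
    pvChunks K (cur ++ p :: ps') =
      PySem.Str.join "\n\n" (cur ++ [p]) :: pvChunks K ps' := by
  cases cur with
  | nil =>
    subst h
    simp only [List.nil_append]
    rw [pvChunks_cons]
    simp
  | cons q rest =>
    rw [List.cons_append, pvChunks_cons]
    have h1 : K - 1 = rest.length + 1 := by simp at h; omega
    have h2 : rest ++ p :: ps' = (rest ++ [p]) ++ ps' := by simp
    have h3 : rest.length + 1 = (rest ++ [p]).length := by simp
    rw [h1, h2, h3, List.take_left, List.drop_left]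
    simp

-- A's fold, started with a partial current chunk, computes pvChunks of the concatenation.
theorem a_eq_chunks (m : Int) (K : Nat)
    (hcond : ∀ c : Nat, 1 ≤ c → (((c : Int)) ≥ m ↔ K ≤ c))
    (ps : List String) : ∀ (acc cur : List String), cur.length + 1 ≤ K →
    (let st := ps.foldl
        (fun (st : List String × List String) p =>
          let cur := st.2 ++ [p]
          if ((cur.length : Int)) ≥ m then
            (st.1 ++ [PySem.Str.join "\n\n" cur], [])
          else
            (st.1, cur)) (acc, cur)
     if st.2 ≠ [] then st.1 ++ [PySem.Str.join "\n\n" st.2] else st.1) =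
    acc ++ pvChunks K (cur ++ ps) := by
  induction ps with
  | nil =>
    intro acc cur hcur
    simp only [List.foldl_nil, List.append_nil]
    cases cur with
    | nil => simp [pvChunks]
    | cons q rest =>
      rw [pvChunks_cons]
      have ht : rest.take (K - 1) = rest := List.take_of_length_le (by simp at hcur; omega)
      have hd : rest.drop (K - 1) = [] := List.drop_eq_nil_of_le (by simp at hcur; omega)
      rw [ht, hd]
      simp [pvChunks]
  | cons p ps' ih =>
    intro acc cur hcur
    simp only [List.foldl_cons]
    by_cases hc : K ≤ cur.length + 1
    · have hKeq : cur.length + 1 = K := by omega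
      have hcond' : (((cur ++ [p]).length : Int)) ≥ m := by
        have := (hcond (cur.length + 1) (by omega)).mpr hc
        simpa using this
      rw [if_pos hcond']
      have := ih (acc ++ [PySem.Str.join "\n\n" (cur ++ [p])]) [] (by simp; omega)
      simp only [List.nil_append] at this
      rw [this, pvChunks_full K cur p ps' hKeq]
      simp
    · have hcond' : ¬ (((cur ++ [p]).length : Int)) ≥ m := by
        intro hge
        have := (hcond (cur.length + 1) (by omega)).mp (by simpa using hge)
        omega
      rw [if_neg hcond']
      have := ih acc (cur ++ [p]) (by simp; omega)
      rw [this]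
      simp

-- ===== VERDICT (by name: the statement is the Claim_ definition above) =====
theorem split_text_by_paragraphs_spec : Claim_equal_split_text_by_paragraphs := by
  intro text m _
  unfold Spec_split_text_by_paragraphs split_text_by_paragraphs split_text_by_paragraphs_alt
  set k : Int := if m > 0 then m else 1 with hkdef
  have hk : 1 ≤ k := by rw [hkdef]; split_ifs with h <;> omega
  rw [b_eq_chunks k hk]
  have := a_eq_chunks m k.toNat
    (by intro c hc; rw [hkdef]; split_ifs with h <;> constructor <;> intro <;> omega)
    ((PySem.Str.split? text "\n\n").getD []) [] [] (by simp; omega)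
  simpa using this
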